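-- pv_equiv track=rewrite | github.com/FilipHojgaard/Small_Projects | AverageAndModeColor/avgColor.py | modeColor
-- ===== SOURCE A (Python) =====
-- def modeColor(image):
--     single_hex = []
--     pixels = []
--     for p in range(0,len(image)):
--         for r in range(0,len(image[p])):
--             for pi in range(0,len(image[p][r])):
--                 single_hex.append(image[p][r][pi])
--             pixels.append(single_hex)
--             single_hex = []
--
--     most_abundant_count = 0
--     most_abundant_pixel = []
--     for i in range(0,len(pixels)):
--         this_abundancy = pixels.count(pixels[i])
--         if (this_abundancy > most_abundant_count):
--             most_abundant_count = this_abundancy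
--             most_abundant_pixel = pixels[i]
--     return most_abundant_pixel
-- ===== SOURCE B (Python) =====
-- def modeColor(image):
--     counts = {}
--     for row in image:
--         for pix in row:
--             t = tuple(pix)
--             counts[t] = counts.get(t, 0) + 1
--     best_count = 0
--     best = []
--     for pix, c in counts.items():
--         if c > best_count:
--             best_count = c
--             best = list(pix)
--     return best
-- ===== Notes on version B (the rewrite author's own statement) =====
-- stated objective: faster
-- what changed: Replaced the index-driven flattening plus a quadratic loop that re-counts each pixel with pixels.count by a single pass building a hash-map counter and one scan over its first-occurrence-ordered items keeping the first strict maximum.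
import Mathlib
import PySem

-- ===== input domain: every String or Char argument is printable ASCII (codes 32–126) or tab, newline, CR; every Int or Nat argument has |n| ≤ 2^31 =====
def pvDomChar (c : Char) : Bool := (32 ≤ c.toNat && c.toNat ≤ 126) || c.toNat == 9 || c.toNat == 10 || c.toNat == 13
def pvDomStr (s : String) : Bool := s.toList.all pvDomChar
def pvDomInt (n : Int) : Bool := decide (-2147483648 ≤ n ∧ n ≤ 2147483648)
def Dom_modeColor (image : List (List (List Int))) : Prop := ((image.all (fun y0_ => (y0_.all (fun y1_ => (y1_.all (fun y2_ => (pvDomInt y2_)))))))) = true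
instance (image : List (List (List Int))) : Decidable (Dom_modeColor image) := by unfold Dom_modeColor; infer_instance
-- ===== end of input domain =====

-- B replaces A's quadratic pixels.count rescan by a dict counter built in one pass
-- plus one scan over its items keeping the first strict maximum (same tie-break).

-- ===== PORT A =====
def modeColor (image : List (List (List Int))) : List Int :=
  -- triple index loop building pixels (each single_hex rebuilt element by element)
  let pixels : List (List Int) :=
    (PySem.List.pyRange 0 (PySem.List.len image) 1).foldl (fun pixels p =>
      let row := PySem.List.pyGetD image p []
      (PySem.List.pyRange 0 (PySem.List.len row) 1).foldl (fun pixels r =>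
        let px := PySem.List.pyGetD row r []
        let single_hex :=
          (PySem.List.pyRange 0 (PySem.List.len px) 1).foldl
            (fun sh pi => sh ++ [PySem.List.pyGetD px pi 0]) []
        pixels ++ [single_hex]) pixels) []
  -- quadratic scan: this_abundancy = pixels.count(pixels[i])
  let st :=
    (PySem.List.pyRange 0 (PySem.List.len pixels) 1).foldl
      (fun (st : Int × List Int) i =>
        let px := PySem.List.pyGetD pixels i []
        let this_abundancy : Int := (PySem.List.count pixels px : Int)
        if this_abundancy > st.1 then (this_abundancy, px) else st)
      (0, [])
  st.2

-- ===== PORT B =====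
def modeColor_alt (image : List (List (List Int))) : List Int :=
  let counts : PySem.Dict (List Int) Int :=
    image.foldl (fun counts row =>
      row.foldl (fun counts pix => counts.insert pix (counts.getD pix 0 + 1)) counts)
      PySem.Dict.empty
  let st :=
    counts.items.foldl
      (fun (st : Int × List Int) kv => if kv.2 > st.1 then (kv.2, kv.1) else st)
      (0, [])
  st.2

-- ===== PRECONDITION & SPEC =====
def Spec_modeColor (image : List (List (List Int))) (out : List Int) : Prop := out = modeColor_alt image
instance (image : List (List (List Int))) (out : List Int) : Decidable (Spec_modeColor image out) := by unfold Spec_modeColor; infer_instance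

-- ===== CLAIM (what is proved, stated in full; the proofs are below) =====
def Claim_equal_modeColor : Prop := ∀ (image : List (List (List Int))), Dom_modeColor image → Spec_modeColor image (modeColor image)

-- ===== LEMMAS AND PROOFS =====

-- the strict-max step over a fixed score function c
def mcStep {α : Type} (c : α → Int) (st : Int × α) (x : α) : Int × α :=
  if c x > st.1 then (c x, x) else st

-- the seen-set accumulated by Set.add is a prefix of the fold's result
theorem foldl_add_prefix {α : Type} [BEq α] [LawfulBEq α] :
    ∀ (l s0 : List α),
      l.foldl PySem.Set.add s0 = s0 ++ (l.foldl PySem.Set.add s0).drop s0.length := by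
  intro l
  induction l with
  | nil => intro s0; simp
  | cons y u ih =>
    intro s0
    simp only [List.foldl_cons]
    by_cases hy : y ∈ s0
    · rw [PySem.Set.add_of_mem hy]; exact ih s0
    · rw [PySem.Set.add_of_not_mem hy]
      have h1 := ih (s0 ++ [y])
      calc u.foldl PySem.Set.add (s0 ++ [y])
          = (s0 ++ [y]) ++ (u.foldl PySem.Set.add (s0 ++ [y])).drop (s0 ++ [y]).length := h1
        _ = s0 ++ ([y] ++ (u.foldl PySem.Set.add (s0 ++ [y])).drop (s0 ++ [y]).length) := by
            simp
        _ = s0 ++ (u.foldl PySem.Set.add (s0 ++ [y])).drop s0.length := by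
            congr 1
            conv_rhs => rw [h1]
            rw [List.append_assoc, List.drop_append_of_le_length (le_refl s0.length)]
            simp

-- key lemma: duplicates never fire the strict '>' update, so folding mcStep over xs
-- equals folding it over the first occurrences of xs not already in seen set s,
-- provided every element of s already scored ≤ st.1.
theorem mcStep_fold_dedup {α : Type} [BEq α] [LawfulBEq α] (c : α → Int) :
    ∀ (xs : List α) (s : PySem.Set α) (st : Int × α),
      (∀ v ∈ s, c v ≤ st.1) →
      xs.foldl (mcStep c) st
        = ((xs.foldl PySem.Set.add s).drop s.length).foldl (mcStep c) st := by
  intro xs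
  induction xs with
  | nil => intro s st _; simp
  | cons x t ih =>
    intro s st h
    by_cases hx : x ∈ s
    · have hle := h x hx
      have hstep : mcStep c st x = st := by
        have hngt : ¬ c x > st.1 := by omega
        simp [mcStep, hngt]
      simp only [List.foldl_cons, hstep, PySem.Set.add_of_mem hx]
      exact ih s st h
    · have hadd : PySem.Set.add s x = s ++ [x] := PySem.Set.add_of_not_mem hx
      have hmono : st.1 ≤ (mcStep c st x).1 := by
        unfold mcStep; split
        · exact le_of_lt ‹_›
        · exact le_refl _
      have hxle : c x ≤ (mcStep c st x).1 := by
        unfold mcStep; split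
        · exact le_refl _
        · omega
      have h' : ∀ v ∈ s ++ [x], c v ≤ (mcStep c st x).1 := by
        intro v hv
        rcases List.mem_append.mp hv with hv | hv
        · exact le_trans (h v hv) hmono
        · simp at hv; subst hv; exact hxle
      have hIH := ih (s ++ [x]) (mcStep c st x) h'
      have hdecomp : (t.foldl PySem.Set.add (s ++ [x])).drop s.length
          = x :: (t.foldl PySem.Set.add (s ++ [x])).drop (s ++ [x]).length := by
        conv_lhs => rw [foldl_add_prefix t (s ++ [x])]
        rw [List.append_assoc, List.drop_append_of_le_length (le_refl s.length)]
        simp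
      simp only [List.foldl_cons, hadd, hdecomp]
      exact hIH

theorem mcStep_fold_ofList {α : Type} [BEq α] [LawfulBEq α] (c : α → Int) (xs : List α) (x0 : α) :
    xs.foldl (mcStep c) (0, x0) = (PySem.Set.ofList xs).foldl (mcStep c) (0, x0) := by
  have := mcStep_fold_dedup c xs [] (0, x0) (by intro v hv; simp at hv)
  simpa [PySem.Set.ofList_eq_foldl] using this

-- A's flattening phase produces the concatenation of the rows
theorem modeColor_pixels (image : List (List (List Int))) :
    (PySem.List.pyRange 0 (PySem.List.len image) 1).foldl (fun pixels p =>
      let row := PySem.List.pyGetD image p []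
      (PySem.List.pyRange 0 (PySem.List.len row) 1).foldl (fun pixels r =>
        let px := PySem.List.pyGetD row r []
        let single_hex :=
          (PySem.List.pyRange 0 (PySem.List.len px) 1).foldl
            (fun sh pi => sh ++ [PySem.List.pyGetD px pi 0]) []
        pixels ++ [single_hex]) pixels) []
    = image.flatten := by
  rw [PySem.List.foldl_pyRange_zero_pyGetD image [] (fun pixels row =>
      (PySem.List.pyRange 0 (PySem.List.len row) 1).foldl (fun pixels r =>
        pixels ++ [(PySem.List.pyRange 0 (PySem.List.len (PySem.List.pyGetD row r [])) 1).foldl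
            (fun sh pi => sh ++ [PySem.List.pyGetD (PySem.List.pyGetD row r []) pi 0]) []]) pixels) []]
  have hrow : ∀ (row : List (List Int)) (acc : List (List Int)),
      (PySem.List.pyRange 0 (PySem.List.len row) 1).foldl (fun pixels r =>
        pixels ++ [(PySem.List.pyRange 0 (PySem.List.len (PySem.List.pyGetD row r [])) 1).foldl
            (fun sh pi => sh ++ [PySem.List.pyGetD (PySem.List.pyGetD row r []) pi 0]) []]) acc
      = acc ++ row := by
    intro row acc
    rw [PySem.List.foldl_pyRange_zero_pyGetD row [] (fun pixels px =>
        pixels ++ [(PySem.List.pyRange 0 (PySem.List.len px) 1).foldl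
            (fun sh pi => sh ++ [PySem.List.pyGetD px pi 0]) []]) acc]
    have hcopy : ∀ px : List Int,
        (PySem.List.pyRange 0 (PySem.List.len px) 1).foldl
            (fun sh pi => sh ++ [PySem.List.pyGetD px pi 0]) [] = px := by
      intro px
      rw [PySem.List.foldl_pyRange_zero_pyGetD px 0 (fun sh e => sh ++ [e]) []]
      simpa using PySem.List.foldl_append_singleton_eq_self px []
    calc row.foldl (fun pixels px =>
            pixels ++ [(PySem.List.pyRange 0 (PySem.List.len px) 1).foldl
              (fun sh pi => sh ++ [PySem.List.pyGetD px pi 0]) []]) acc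
        = row.foldl (fun pixels px => pixels ++ [px]) acc := by
          apply PySem.List.foldl_congr_mem
          intro acc' px _
          rw [hcopy px]
      _ = acc ++ row := PySem.List.foldl_append_singleton_eq_self row acc
  calc image.foldl (fun pixels row =>
          (PySem.List.pyRange 0 (PySem.List.len row) 1).foldl (fun pixels r =>
            pixels ++ [(PySem.List.pyRange 0 (PySem.List.len (PySem.List.pyGetD row r [])) 1).foldl
              (fun sh pi => sh ++ [PySem.List.pyGetD (PySem.List.pyGetD row r []) pi 0]) []]) pixels) []
      = image.foldl (fun pixels row => pixels ++ row) [] := by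
        apply PySem.List.foldl_congr_mem
        intro acc row _
        exact hrow row acc
    _ = image.flatten := by simpa using PySem.List.foldl_append_eq_flatten image []

-- ===== VERDICT (by name: the statement is the Claim_ definition above) =====
theorem modeColor_spec : Claim_equal_modeColor := by
  intro image _
  unfold Spec_modeColor modeColor modeColor_alt
  simp only [modeColor_pixels]
  -- B's counter over the nested loops is the counter of the flattened list
  rw [← List.foldl_flatten (f := fun counts pix =>
        PySem.Dict.insert counts pix (counts.getD pix 0 + 1))]
  rw [PySem.Dict.foldl_insert_getD_add_one_eq_counter, PySem.Dict.items_counter]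
  -- A's index loop is a fold of mcStep over the flattened list
  rw [PySem.List.foldl_pyRange_zero_pyGetD image.flatten []
      (fun (st : Int × List Int) px =>
        if (PySem.List.count image.flatten px : Int) > st.1
        then ((PySem.List.count image.flatten px : Int), px) else st) (0, [])]
  -- B's items loop is the same fold over the deduped list
  rw [List.foldl_map]
  have hA : image.flatten.foldl
      (fun (st : Int × List Int) px =>
        if (PySem.List.count image.flatten px : Int) > st.1
        then ((PySem.List.count image.flatten px : Int), px) else st) (0, [])
      = image.flatten.foldl (mcStep (fun px => (PySem.List.count image.flatten px : Int))) (0, []) := rfl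
  have hB : (PySem.Set.ofList image.flatten).foldl
      (fun (st : Int × List Int) k =>
        if ((image.flatten.count k : Int)) > st.1 then (((image.flatten.count k : Int)), k) else st) (0, [])
      = (PySem.Set.ofList image.flatten).foldl (mcStep (fun px => (PySem.List.count image.flatten px : Int))) (0, []) := rfl
  rw [hA, hB, mcStep_fold_ofList]
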